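-- pv_equiv track=rewrite | github.com/tumi8/tma-23-target-generation | algorithms/6Forest/6forest_to_targetlist.py | seed_to_targets_plain
-- ===== SOURCE A (Python) =====
-- def seed_to_targets_plain(seed, indizes):
--     # takes a seed address and replaces each wildcard with a hex digit from 0 to f each
--     # returns all those permutations
--     res = []
--     if len(indizes) == 1:
--         ind = indizes[0]
--         res.extend([''.join([seed[:ind], hex(i)[2:], seed[ind + 1:], '\n']) for i in range(16)])
--     else:
--         for ind in indizes:
--             # new_indizes are ones except the current one
--             new_indizes = [i for i in indizes if i != ind]
--             for i in range(16):
--                 res.extend(seed_to_targets_plain(''.join([seed[:ind], hex(i)[2:], seed[ind + 1:]]), new_indizes))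
--     return res
-- ===== SOURCE B (Python) =====
-- def seed_to_targets_plain(seed, indizes):
--     # Iterative re-implementation: explicit LIFO stack of (partial_seed, remaining wildcard
--     # indices) states instead of recursion; same pre-order DFS, hence same output order.
--     res = []
--     stack = [(seed, indizes)]
--     while stack:
--         cur, rem = stack.pop()
--         if len(rem) == 1:
--             ind = rem[0]
--             res.extend(cur[:ind] + hex(i)[2:] + cur[ind + 1:] + '\n' for i in range(16))
--         else:
--             children = [(cur[:ind] + hex(i)[2:] + cur[ind + 1:],
--                          [j for j in rem if j != ind])
--                         for ind in rem for i in range(16)]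
--             stack.extend(reversed(children))
--     return res
-- ===== Notes on version B (the rewrite author's own statement) =====
-- stated objective: alternative
-- what changed: Replaces A's recursion with an explicit LIFO stack of (partial seed, remaining indices) states pushed in reverse, reproducing the same pre-order DFS iteratively.
import Mathlib
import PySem

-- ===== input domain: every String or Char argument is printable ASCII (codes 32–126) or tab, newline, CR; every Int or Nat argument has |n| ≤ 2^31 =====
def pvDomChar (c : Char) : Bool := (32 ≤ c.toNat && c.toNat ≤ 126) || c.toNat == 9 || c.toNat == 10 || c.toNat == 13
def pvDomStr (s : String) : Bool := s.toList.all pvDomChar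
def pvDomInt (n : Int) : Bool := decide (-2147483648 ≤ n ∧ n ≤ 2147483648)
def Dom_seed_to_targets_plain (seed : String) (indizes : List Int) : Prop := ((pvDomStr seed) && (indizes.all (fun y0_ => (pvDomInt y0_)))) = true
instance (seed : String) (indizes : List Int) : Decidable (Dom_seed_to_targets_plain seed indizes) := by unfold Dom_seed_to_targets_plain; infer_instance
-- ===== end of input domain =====

-- B replaces A's recursion by an explicit LIFO stack of (partial seed, remaining indices)
-- states, pushed in reverse so the same pre-order DFS (and output order) results.

-- hex(i)[2:] for 0 ≤ i < 16, ported by hand (exact on this domain: one lowercase hex digit)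
def pvHex1 (i : Nat) : List Char :=
  if i < 10 then [Char.ofNat (48 + i)] else [Char.ofNat (87 + i)]

-- ''.join([seed[:ind], hex(i)[2:], seed[ind+1:]]) — this expression appears verbatim in both Pythons
def pvSubst (s : List Char) (ind : Int) (i : Nat) : List Char :=
  PySem.List.slice s none (some ind) ++ pvHex1 i ++ PySem.List.slice s (some (ind + 1)) none

-- ===== PORT A =====
def pvGoA (s : List Char) (indizes : List Int) : List (List Char) :=
  if indizes.length == 1 then
    (List.range 16).map (fun i => pvSubst s (PySem.List.pyGetD indizes 0 0) i ++ ['\n'])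
  else
    indizes.attach.flatMap (fun ind =>
      let newInd := indizes.filter (fun j => j != ind.1)
      (List.range 16).flatMap (fun i => pvGoA (pvSubst s ind.1 i) newInd))
termination_by indizes.length
decreasing_by
  simp only [List.unattach_filter, List.unattach_attach]
  rw [List.length_filter_lt_length_iff_exists]
  exact ⟨ind.1, ind.2, by simp⟩

def seed_to_targets_plain (seed : String) (indizes : List Int) : List String :=
  (pvGoA seed.toList indizes).map String.ofList

-- ===== PORT B =====
-- termination measure for B's stack loop: weight of one state by wildcard count
def pvMeasure : Nat → Nat
  | 0 => 1
  | n + 1 => 16 * (n + 1) * pvMeasure n + 1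

theorem pvMeasure_pos (n : Nat) : 0 < pvMeasure n := by
  cases n <;> simp [pvMeasure]

theorem pvMeasure_mono {m n : Nat} (h : m ≤ n) : pvMeasure m ≤ pvMeasure n := by
  induction n with
  | zero => simp_all
  | succ k ih =>
    rcases Nat.lt_or_ge m (k+1) with h' | h'
    · exact le_trans (ih (by omega)) (by simp [pvMeasure]; nlinarith [pvMeasure_pos k])
    · have : m = k + 1 := by omega
      simp [this]

theorem pvFlatMapAttach {α β : Type} (r : List α) (g : α → List β) :
    r.attach.flatMap (fun x => g x.1) = r.flatMap g := by
  induction r with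
  | nil => rfl
  | cons a t ih => simp_all [List.attach_cons, List.flatMap_map]

-- the children of a non-singleton state weigh strictly less than the state itself
theorem pvChildSum (s : List Char) (r : List Int) :
    ((r.flatMap fun ind => (List.range 16).map fun i =>
        (pvSubst s ind i, r.filter (fun j => j != ind))).map
      (fun p => pvMeasure p.2.length)).sum < pvMeasure r.length := by
  cases hr : r with
  | nil => simp [pvMeasure]
  | cons a t =>
    rw [← hr]
    have hlen : r.length = t.length + 1 := by simp [hr]
    have hbound : ∀ x ∈ (r.flatMap fun ind => (List.range 16).map fun i =>
        (pvSubst s ind i, r.filter (fun j => j != ind))).map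
        (fun p => pvMeasure p.2.length), x ≤ pvMeasure t.length := by
      intro x hx
      simp only [List.mem_map, List.mem_flatMap] at hx
      obtain ⟨p, ⟨ind, hind, hp⟩, hxp⟩ := hx
      obtain ⟨i, _, hpi⟩ := hp
      subst hxp; rw [← hpi]; dsimp only
      apply pvMeasure_mono
      have : (r.filter (fun j => j != ind)).length < r.length := by
        rw [List.length_filter_lt_length_iff_exists]
        exact ⟨ind, hind, by simp⟩
      omega
    have hsum := List.sum_le_card_nsmul _ _ hbound
    have hL : ((r.flatMap fun ind => (List.range 16).map fun i =>
        (pvSubst s ind i, r.filter (fun j => j != ind))).map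
        (fun p => pvMeasure p.2.length)).length = 16 * r.length := by
      simp [List.length_flatMap, List.map_const', List.sum_replicate, Nat.mul_comm]
    rw [hL, smul_eq_mul] at hsum
    calc _ ≤ 16 * r.length * pvMeasure t.length := hsum
      _ < pvMeasure r.length := by
          rw [hlen, pvMeasure]; nlinarith [pvMeasure_pos t.length]

-- the stack loop: pop a state; a single remaining index emits the 16 lines, otherwise
-- all child states are pushed so that they pop in original order
def pvGoB (res : List (List Char)) (stack : List (List Char × List Int)) : List (List Char) :=
  match stack with
  | [] => res
  | (s, r) :: rest =>
    if r.length == 1 then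
      pvGoB (res ++ (List.range 16).map (fun i =>
        pvSubst s (PySem.List.pyGetD r 0 0) i ++ ['\n'])) rest
    else
      pvGoB res ((r.flatMap fun ind => (List.range 16).map fun i =>
        (pvSubst s ind i, r.filter (fun j => j != ind))) ++ rest)
termination_by (stack.map (fun p => pvMeasure p.2.length)).sum
decreasing_by
  · have := pvMeasure_pos r.length
    simp; omega
  · simp only [List.unattach_filter, List.unattach_attach]
    have hattach := pvFlatMapAttach r (fun ind => (List.range 16).map fun i =>
      (pvSubst s ind i, r.filter (fun j => j != ind)))
    rw [hattach]
    simp only [List.map_append, List.sum_append, List.map_cons, List.sum_cons]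
    have := pvChildSum s r
    omega

def seed_to_targets_plain_alt (seed : String) (indizes : List Int) : List String :=
  (pvGoB [] [(seed.toList, indizes)]).map String.ofList

-- ===== PRECONDITION & SPEC =====
def Spec_seed_to_targets_plain (seed : String) (indizes : List Int) (out : List String) : Prop := out = seed_to_targets_plain_alt seed indizes
instance (seed : String) (indizes : List Int) (out : List String) : Decidable (Spec_seed_to_targets_plain seed indizes out) := by unfold Spec_seed_to_targets_plain; infer_instance

-- ===== CLAIM (what is proved, stated in full; the proofs are below) =====
def Claim_equal_seed_to_targets_plain : Prop := ∀ (seed : String) (indizes : List Int), Dom_seed_to_targets_plain seed indizes → Spec_seed_to_targets_plain seed indizes (seed_to_targets_plain seed indizes)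

-- ===== LEMMAS AND PROOFS =====

-- in the non-singleton case, A's recursive step is the flatMap of A over B's child states
theorem pvGoA_children (s : List Char) (r : List Int) (h : ¬ (r.length == 1) = true) :
    pvGoA s r = (r.flatMap fun ind => (List.range 16).map fun i =>
      (pvSubst s ind i, r.filter (fun j => j != ind))).flatMap
      (fun p => pvGoA p.1 p.2) := by
  rw [pvGoA.eq_def]
  simp only [h, Bool.false_eq_true, if_false, List.flatMap_assoc, List.flatMap_map]
  exact pvFlatMapAttach r (fun ind => (List.range 16).flatMap fun i =>
    pvGoA (pvSubst s ind i) (r.filter (fun j => j != ind)))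

-- loop invariant: the stack loop appends, in order, A's expansion of every stacked state
theorem pvGoB_eq (stack : List (List Char × List Int)) (res : List (List Char)) :
    pvGoB res stack = res ++ stack.flatMap (fun p => pvGoA p.1 p.2) := by
  generalize hN : (stack.map (fun p => pvMeasure p.2.length)).sum = N
  induction N using Nat.strong_induction_on generalizing stack res with
  | _ N ih =>
  match stack, hN with
  | [], _ => rw [pvGoB]; simp
  | (s, r) :: rest, hN =>
    rw [pvGoB]
    simp only [List.map_cons, List.sum_cons] at hN
    by_cases hr : (r.length == 1) = true
    · rw [if_pos hr,
        ih ((rest.map (fun p => pvMeasure p.2.length)).sum)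
          (by have := pvMeasure_pos r.length; omega) rest _ rfl]
      rw [List.flatMap_cons, pvGoA.eq_def]
      simp [hr, List.append_assoc]
    · rw [if_neg hr,
        ih ((((r.flatMap fun ind => (List.range 16).map fun i =>
            (pvSubst s ind i, r.filter (fun j => j != ind))) ++ rest).map
            (fun p => pvMeasure p.2.length)).sum)
          (by simp only [List.map_append, List.sum_append]
              have := pvChildSum s r; omega) _ _ rfl]
      rw [List.flatMap_cons, pvGoA_children s r hr]
      simp [List.flatMap_append]

-- ===== VERDICT (by name: the statement is the Claim_ definition above) =====
theorem seed_to_targets_plain_spec : Claim_equal_seed_to_targets_plain := by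
  intro seed indizes _
  unfold Spec_seed_to_targets_plain seed_to_targets_plain seed_to_targets_plain_alt
  rw [pvGoB_eq]
  simp
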